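-- pv_equiv track=rewrite | github.com/jodnddus/ps | programmers/모의고사.py | solution
-- ===== SOURCE A (Python) =====
-- def solution(answers):
--     a = [1, 2, 3, 4, 5]
--     b = [2, 1, 2, 3, 2, 4, 2, 5]
--     c = [3, 3, 1, 1, 2, 2, 4, 4, 5, 5]
--
--     counts = [0, 0, 0]
--
--     for index, answer in enumerate(answers):
--         if answer == a[index % len(a)]:
--             counts[0] += 1
--         if answer == b[index % len(b)]:
--             counts[1] += 1
--         if answer == c[index % len(c)]:
--             counts[2] += 1
--
--     answer = [i + 1 for i, value in enumerate(counts) if value == max(counts)]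
--     return answer
-- ===== SOURCE B (Python) =====
-- def solution(answers):
--     patterns = [
--         [1, 2, 3, 4, 5],
--         [2, 1, 2, 3, 2, 4, 2, 5],
--         [3, 3, 1, 1, 2, 2, 4, 4, 5, 5],
--     ]
--     # one pass: frequency table keyed by (position mod 40, answer); 40 = lcm(5, 8, 10),
--     # so every pattern's score is then read off the 40-slot table without rescanning answers
--     freq = {}
--     for i, ans in enumerate(answers):
--         key = (i % 40, ans)
--         freq[key] = freq.get(key, 0) + 1
--     counts = [sum(freq.get((r, p[r % len(p)]), 0) for r in range(40)) for p in patterns]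
--     m = max(counts)
--     return [i + 1 for i, v in enumerate(counts) if v == m]
-- ===== Notes on version B (the rewrite author's own statement) =====
-- stated objective: alternative
-- what changed: Instead of A's fused loop that compares every answer against all three cyclic patterns, B makes one pass building a frequency table keyed by (index mod 40, answer) (40 = lcm of the pattern lengths) and then reads each pattern's score off the 40-slot table without rescanning the answers; the max/tie selection is unchanged.
import Mathlib
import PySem

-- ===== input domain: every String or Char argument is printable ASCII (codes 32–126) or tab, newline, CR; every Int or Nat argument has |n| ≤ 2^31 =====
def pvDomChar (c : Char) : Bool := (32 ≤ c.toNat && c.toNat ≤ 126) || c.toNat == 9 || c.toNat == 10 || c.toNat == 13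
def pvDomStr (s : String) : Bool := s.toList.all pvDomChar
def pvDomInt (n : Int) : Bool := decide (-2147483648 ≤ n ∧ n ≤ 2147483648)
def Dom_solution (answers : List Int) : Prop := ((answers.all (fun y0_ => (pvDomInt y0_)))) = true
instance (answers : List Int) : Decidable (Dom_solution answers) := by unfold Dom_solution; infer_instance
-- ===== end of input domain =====

-- B replaces A's fused per-answer comparison loop with one pass building a frequency
-- table keyed by (index mod 40, answer), then reads each pattern's score off that
-- 40-slot table; objective: alternative (same asymptotic cost).

-- ===== PORT A =====
def solution (answers : List Int) : List Int :=
  let a : List Int := [1, 2, 3, 4, 5]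
  let b : List Int := [2, 1, 2, 3, 2, 4, 2, 5]
  let c : List Int := [3, 3, 1, 1, 2, 2, 4, 4, 5, 5]
  let counts : Int × Int × Int :=
    (PySem.List.enumerate answers).foldl
      (fun cs p =>
        let cs := if p.2 == PySem.List.pyGetD a (PySem.Int.mod p.1 5) 0 then
                    (cs.1 + 1, cs.2.1, cs.2.2) else cs
        let cs := if p.2 == PySem.List.pyGetD b (PySem.Int.mod p.1 8) 0 then
                    (cs.1, cs.2.1 + 1, cs.2.2) else cs
        if p.2 == PySem.List.pyGetD c (PySem.Int.mod p.1 10) 0 then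
          (cs.1, cs.2.1, cs.2.2 + 1) else cs)
      (0, 0, 0)
  let countsL : List Int := [counts.1, counts.2.1, counts.2.2]
  let m := (PySem.List.max? countsL (fun v => v)).getD 0
  ((PySem.List.enumerate countsL).filter (fun p => p.2 == m)).map (fun p => p.1 + 1)

-- ===== PORT B =====
-- the one-pass frequency table: freq[(i % 40, ans)] += 1
def freqB (answers : List Int) : PySem.Dict (Int × Int) Int :=
  (PySem.List.enumerate answers).foldl
    (fun d q => d.insert (PySem.Int.mod q.1 40, q.2)
                  (d.getD (PySem.Int.mod q.1 40, q.2) 0 + 1))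
    PySem.Dict.empty

-- sum(freq.get((r, p[r % len(p)]), 0) for r in range(40))
def scoreB (freq : PySem.Dict (Int × Int) Int) (pat : List Int) : Int :=
  ((PySem.List.pyRange 0 40 1).map
    (fun r => freq.getD (r, PySem.List.pyGetD pat (PySem.Int.mod r (pat.length : Int)) 0) 0)).sum

def solution_alt (answers : List Int) : List Int :=
  let patterns : List (List Int) :=
    [[1, 2, 3, 4, 5], [2, 1, 2, 3, 2, 4, 2, 5], [3, 3, 1, 1, 2, 2, 4, 4, 5, 5]]
  let freq := freqB answers
  let counts := patterns.map (fun p => scoreB freq p)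
  let m := (PySem.List.max? counts (fun v => v)).getD 0
  ((PySem.List.enumerate counts).filter (fun p => p.2 == m)).map (fun p => p.1 + 1)

-- ===== PRECONDITION & SPEC =====
def Spec_solution (answers : List Int) (out : List Int) : Prop := out = solution_alt answers
instance (answers : List Int) (out : List Int) : Decidable (Spec_solution answers out) := by unfold Spec_solution; infer_instance

-- ===== CLAIM (what is proved, stated in full; the proofs are below) =====
def Claim_equal_solution : Prop := ∀ (answers : List Int), Dom_solution answers → Spec_solution answers (solution answers)

-- ===== LEMMAS AND PROOFS =====

-- the fused fold of A computes the three independent match counts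
theorem foldl_eq_counts (l : List Int) : ∀ (s c0 c1 c2 : Int),
    (PySem.List.enumerate l s).foldl
      (fun (cs : Int × Int × Int) (p : Int × Int) =>
        let cs := if p.2 == PySem.List.pyGetD ([1,2,3,4,5] : List Int) (PySem.Int.mod p.1 5) 0 then
                    (cs.1 + 1, cs.2.1, cs.2.2) else cs
        let cs := if p.2 == PySem.List.pyGetD ([2,1,2,3,2,4,2,5] : List Int) (PySem.Int.mod p.1 8) 0 then
                    (cs.1, cs.2.1 + 1, cs.2.2) else cs
        if p.2 == PySem.List.pyGetD ([3,3,1,1,2,2,4,4,5,5] : List Int) (PySem.Int.mod p.1 10) 0 then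
          (cs.1, cs.2.1, cs.2.2 + 1) else cs)
      (c0, c1, c2)
    = (c0 + ((PySem.List.enumerate l s).countP
              (fun q => q.2 == PySem.List.pyGetD ([1,2,3,4,5] : List Int) (PySem.Int.mod q.1 5) 0) : Int),
       c1 + ((PySem.List.enumerate l s).countP
              (fun q => q.2 == PySem.List.pyGetD ([2,1,2,3,2,4,2,5] : List Int) (PySem.Int.mod q.1 8) 0) : Int),
       c2 + ((PySem.List.enumerate l s).countP
              (fun q => q.2 == PySem.List.pyGetD ([3,3,1,1,2,2,4,4,5,5] : List Int) (PySem.Int.mod q.1 10) 0) : Int)) := by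
  induction l with
  | nil => intro s c0 c1 c2; simp [PySem.List.enumerate_nil]
  | cons x t ih =>
    intro s c0 c1 c2
    rw [PySem.List.enumerate_cons]
    simp only [List.foldl_cons, List.countP_cons]
    by_cases h1 : (x == PySem.List.pyGetD ([1,2,3,4,5] : List Int) (PySem.Int.mod s 5) 0) = true <;>
    by_cases h2 : (x == PySem.List.pyGetD ([2,1,2,3,2,4,2,5] : List Int) (PySem.Int.mod s 8) 0) = true <;>
    by_cases h3 : (x == PySem.List.pyGetD ([3,3,1,1,2,2,4,4,5,5] : List Int) (PySem.Int.mod s 10) 0) = true <;>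
    simp only [h1, h2, h3, if_true, Bool.not_eq_true] at * <;>
    simp only [ih (s + 1)] <;>
    refine Prod.ext ?_ (Prod.ext ?_ ?_) <;> simp <;> ring

-- B's fold IS the counter of the (i % 40, answer) pairs
theorem freqB_eq_counter (answers : List Int) :
    freqB answers
      = PySem.Dict.counter
          ((PySem.List.enumerate answers).map (fun q => (PySem.Int.mod q.1 40, q.2))) := by
  unfold freqB
  rw [← PySem.Dict.foldl_insert_getD_add_one_eq_counter, List.foldl_map]

-- sum of a 0/1 indicator over a duplicate-free list containing the hit is 1
theorem sum_indicator_one (l : List Int) (a : Int) (hn : l.Nodup) (ha : a ∈ l) :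
    (l.map (fun r => if r = a then (1:Int) else 0)).sum = 1 := by
  induction l with
  | nil => cases ha
  | cons x t ih =>
    simp only [List.map_cons, List.sum_cons]
    rcases List.mem_cons.mp ha with h | h
    · subst h
      have hx : a ∉ t := (List.nodup_cons.mp hn).1
      have hz : (t.map (fun r => if r = a then (1:Int) else 0)).sum = 0 := by
        apply List.sum_eq_zero; intro y hy
        rcases List.mem_map.mp hy with ⟨r, hr, hry⟩
        have : r ≠ a := fun h' => hx (h' ▸ hr)
        simp [← hry, this]
      simp [hz]
    · have hx : x ≠ a := by rintro rfl; exact (List.nodup_cons.mp hn).1 h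
      rw [ih (List.nodup_cons.mp hn).2 h]; simp [hx]

-- the 40-slot read-off of the pair counts is the plain match count
theorem sum_count_pairs (g : Int → Int) (l : List (Int × Int)) :
    ((PySem.List.pyRange 0 40 1).map
      (fun r => ((l.map (fun q => (PySem.Int.mod q.1 40, q.2))).count (r, g r) : Int))).sum
    = (l.countP (fun q => q.2 == g (PySem.Int.mod q.1 40)) : Int) := by
  induction l with
  | nil => simp
  | cons q t ih =>
    have hb : (0:Int) ≤ PySem.Int.mod q.1 40 ∧ PySem.Int.mod q.1 40 < 40 :=
      ⟨PySem.Int.mod_nonneg q.1 (by norm_num), PySem.Int.mod_lt q.1 (by norm_num)⟩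
    have hr : PySem.Int.mod q.1 40 ∈ PySem.List.pyRange 0 40 1 := by
      rw [PySem.List.mem_pyRange_one]; omega
    simp only [List.map_cons, List.countP_cons]
    by_cases h : (q.2 == g (PySem.Int.mod q.1 40)) = true
    · have heq : ∀ r, ((((PySem.Int.mod q.1 40, q.2) :: t.map (fun q => (PySem.Int.mod q.1 40, q.2))).count (r, g r) : Int))
          = ((t.map (fun q => (PySem.Int.mod q.1 40, q.2))).count (r, g r) : Int)
            + (if r = PySem.Int.mod q.1 40 then 1 else 0) := by
        intro r
        rcases eq_or_ne r (PySem.Int.mod q.1 40) with hre | hre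
        · subst hre
          rw [show ((PySem.Int.mod q.1 40, q.2)) = (PySem.Int.mod q.1 40, g (PySem.Int.mod q.1 40)) by
                rw [beq_iff_eq.mp h],
              List.count_cons_self]
          simp
        · rw [List.count_cons_of_ne, if_neg hre]
          · ring
          · intro hcontra
            exact hre ((Prod.mk.injEq _ _ _ _).mp hcontra.symm).1
      simp only [heq]
      rw [PySem.List.sum_map_add_int, ih,
          sum_indicator_one (PySem.List.pyRange 0 40 1) (PySem.Int.mod q.1 40) (by decide) hr, h]
      simp
    · have heq : ∀ r, ((((PySem.Int.mod q.1 40, q.2) :: t.map (fun q => (PySem.Int.mod q.1 40, q.2))).count (r, g r) : Int))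
          = ((t.map (fun q => (PySem.Int.mod q.1 40, q.2))).count (r, g r) : Int) := by
        intro r
        rw [List.count_cons_of_ne]
        intro hcontra
        rcases (Prod.mk.injEq _ _ _ _).mp hcontra with ⟨h1, h2⟩
        exact h (by rw [beq_iff_eq, h2, ← h1])
      simp only [heq, ih, h]
      simp

-- i % 40 % L = i % L for L dividing 40
theorem mod_mod_forty (i L : Int) (hpos : 0 < L) (hdvd : L ∣ 40) :
    PySem.Int.mod (PySem.Int.mod i 40) L = PySem.Int.mod i L := by
  rw [PySem.Int.mod_eq_emod_of_pos (by norm_num : (0:Int) < 40),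
      PySem.Int.mod_eq_emod_of_pos hpos, PySem.Int.mod_eq_emod_of_pos hpos]
  exact Int.emod_emod_of_dvd i hdvd

-- B's score of a pattern whose length divides 40 is the plain match count
theorem scoreB_eq_countP (answers : List Int) (pat : List Int) (L : Int)
    (hL : (pat.length : Int) = L) (hpos : 0 < L) (hdvd : L ∣ 40) :
    scoreB (freqB answers) pat
      = ((PySem.List.enumerate answers).countP
          (fun q => q.2 == PySem.List.pyGetD pat (PySem.Int.mod q.1 L) 0) : Int) := by
  unfold scoreB
  rw [freqB_eq_counter, hL]
  simp only [PySem.Dict.getD_counter]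
  rw [sum_count_pairs (fun r => PySem.List.pyGetD pat (PySem.Int.mod r L) 0)]
  congr 1
  apply List.countP_congr
  intro q _
  rw [mod_mod_forty q.1 L hpos hdvd]

theorem solution_spec : Claim_equal_solution := by
  intro answers _
  unfold Spec_solution solution solution_alt
  simp only [List.map_cons, List.map_nil]
  rw [foldl_eq_counts answers 0 0 0 0,
      scoreB_eq_countP answers _ 5 (by norm_num) (by norm_num) (by norm_num),
      scoreB_eq_countP answers _ 8 (by norm_num) (by norm_num) (by norm_num),
      scoreB_eq_countP answers _ 10 (by norm_num) (by norm_num) (by norm_num)]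
  norm_num
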